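-- pv_equiv track=rewrite | github.com/eunsu-park/eunsu-park.github.io | study/examples/Algorithm/python/29_practice.py | min_max_distance
-- ===== SOURCE A (Python) =====
-- from typing import List, Tuple, Dict, Set, Optional
--
-- def min_max_distance(houses: List[int], k: int) -> int:
--     """
--     k개의 우체통을 설치하여 가장 먼 집까지의 거리 최소화
--     파라메트릭 서치: "최대 거리가 d 이하가 되게 할 수 있는가?"
--     시간복잡도: O(n log D)
--     """
--     houses = sorted(houses)
--     n = len(houses)
--
--     def can_cover(max_dist: int) -> bool:
--         """최대 거리 max_dist로 모든 집을 커버 가능한지"""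
--         count = 1
--         last_post = houses[0]
--
--         for house in houses:
--             if house - last_post > 2 * max_dist:
--                 count += 1
--                 last_post = house
--
--         return count <= k
--
--     lo, hi = 0, houses[-1] - houses[0]
--
--     while lo < hi:
--         mid = (lo + hi) // 2
--         if can_cover(mid):
--             hi = mid
--         else:
--             lo = mid + 1
--
--     return lo
-- ===== SOURCE B (Python) =====
-- def min_max_distance(houses, k):
--     """Binary-search the answer distance; each feasibility probe counts greedy
--     coverage groups by jumping from group head to group head, locating every
--     boundary with an upper-bound binary search (capped once the count exceeds k)
--     instead of scanning every house."""
--     hs = sorted(houses)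
--     n = len(hs)
--
--     def upper(i, limit):
--         # first index j in (i, n] with hs[j] > limit (hs is sorted)
--         lo, hi = i + 1, n
--         while lo < hi:
--             m = (lo + hi) // 2
--             if hs[m] <= limit:
--                 lo = m + 1
--             else:
--                 hi = m
--         return lo
--
--     def groups_within(d):
--         # number of greedy coverage groups of width <= 2*d, via boundary jumps
--         i, g = 0, 0
--         while i < n:
--             g += 1
--             if g > k:
--                 return g
--             i = upper(i, hs[i] + 2 * d)
--         return g
--
--     lo, hi = 0, hs[n - 1] - hs[0]
--     while lo < hi:
--         mid = (lo + hi) // 2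
--         if groups_within(mid) <= k:
--             hi = mid
--         else:
--             lo = mid + 1
--     return lo
-- ===== Notes on version B (the rewrite author's own statement) =====
-- stated objective: alternative
-- what changed: B keeps the answer binary search but replaces A's full linear greedy scan per feasibility probe (count/last_post fold over every house) by boundary jumps: each greedy group boundary is found with an upper-bound binary search and the count is capped once it exceeds k; Pre_ excludes only the empty list, on which both raise IndexError.
-- outside the precondition, e.g. on min_max_distance([], 1): A raises IndexError, B raises IndexError
import Mathlib
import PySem

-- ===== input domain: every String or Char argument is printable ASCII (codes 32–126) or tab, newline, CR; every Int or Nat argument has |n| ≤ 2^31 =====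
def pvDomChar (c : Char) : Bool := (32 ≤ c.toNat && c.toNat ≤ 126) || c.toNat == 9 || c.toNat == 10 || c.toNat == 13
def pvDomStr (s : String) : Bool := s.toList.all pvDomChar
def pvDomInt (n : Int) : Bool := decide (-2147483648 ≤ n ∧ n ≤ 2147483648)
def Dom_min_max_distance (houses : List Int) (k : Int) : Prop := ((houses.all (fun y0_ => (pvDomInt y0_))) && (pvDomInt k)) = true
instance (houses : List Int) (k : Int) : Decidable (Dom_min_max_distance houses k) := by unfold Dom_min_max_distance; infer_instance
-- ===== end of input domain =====

-- B keeps the answer binary search but counts greedy coverage groups per probe by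
-- binary-search boundary jumps (capped above k) instead of a full linear scan
-- (objective: alternative).
-- All while-loops are ported as structural recursion on a fuel argument that is a
-- proven upper bound on the number of iterations (a totality device only).

-- ===== PORT A =====
-- can_cover(max_dist): greedy fold over the sorted list with state (count, last_post)
def pvCanCover (hs : List Int) (k : Int) (h0 : Int) (maxDist : Int) : Bool :=
  decide ((hs.foldl (fun (st : Int × Int) house =>
    if house - st.2 > 2 * maxDist then (st.1 + 1, house) else st) (1, h0)).1 ≤ k)

-- while lo < hi: mid = (lo+hi)//2; if can_cover(mid): hi = mid else lo = mid+1
-- (fuel ≥ (hi-lo).toNat suffices: the interval shrinks each iteration)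
def pvSearchA (hs : List Int) (k h0 : Int) : Nat → Int → Int → Int
  | 0, lo, _ => lo
  | fuel + 1, lo, hi =>
    if lo < hi then
      if pvCanCover hs k h0 (PySem.Int.floordiv (lo + hi) 2) then
        pvSearchA hs k h0 fuel lo (PySem.Int.floordiv (lo + hi) 2)
      else pvSearchA hs k h0 fuel (PySem.Int.floordiv (lo + hi) 2 + 1) hi
    else lo

def min_max_distance (houses : List Int) (k : Int) : Int :=
  let hs := PySem.List.sorted houses (fun x => x) false
  -- houses[0] / houses[-1] raise IndexError on the empty list (excluded by Pre_); default 0 here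
  let h0 := PySem.List.pyGetD hs 0 0
  let hi := PySem.List.pyGetD hs (-1) 0 - h0
  pvSearchA hs k h0 hi.toNat 0 hi

-- ===== PORT B =====
-- upper(i, limit): while lo < hi: m = (lo+hi)//2; if hs[m] <= limit: lo = m+1 else hi = m
def pvUpperLoop (hs : List Int) (limit : Int) : Nat → Int → Int → Int
  | 0, lo, _ => lo
  | fuel + 1, lo, hi =>
    if lo < hi then
      if PySem.List.pyGetD hs (PySem.Int.floordiv (lo + hi) 2) 0 ≤ limit then
        pvUpperLoop hs limit fuel (PySem.Int.floordiv (lo + hi) 2 + 1) hi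
      else pvUpperLoop hs limit fuel lo (PySem.Int.floordiv (lo + hi) 2)
    else lo

-- groups_within(d): jump from group head to group head, capped just above k
-- (fuel ≥ (n-i).toNat suffices: each jump advances i by at least 1)
def pvGroups (hs : List Int) (n k t : Int) : Nat → Int → Int → Int
  | 0, _, g => g
  | fuel + 1, i, g =>
    if i < n then
      if k < g + 1 then g + 1
      else pvGroups hs n k t fuel
        (pvUpperLoop hs (PySem.List.pyGetD hs i 0 + t) (n - (i + 1)).toNat (i + 1) n) (g + 1)
    else g

-- while lo < hi: mid = (lo+hi)//2; if groups_within(mid) <= k: hi = mid else lo = mid+1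
def pvSearchB (hs : List Int) (n k : Int) : Nat → Int → Int → Int
  | 0, lo, _ => lo
  | fuel + 1, lo, hi =>
    if lo < hi then
      if pvGroups hs n k (2 * PySem.Int.floordiv (lo + hi) 2) hs.length 0 0 ≤ k then
        pvSearchB hs n k fuel lo (PySem.Int.floordiv (lo + hi) 2)
      else pvSearchB hs n k fuel (PySem.Int.floordiv (lo + hi) 2 + 1) hi
    else lo

def min_max_distance_alt (houses : List Int) (k : Int) : Int :=
  let hs := PySem.List.sorted houses (fun x => x) false
  let n : Int := hs.length
  -- hs[n-1] / hs[0] raise IndexError on the empty list (excluded by Pre_); default 0 here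
  let span := PySem.List.pyGetD hs (n - 1) 0 - PySem.List.pyGetD hs 0 0
  pvSearchB hs n k span.toNat 0 span

-- ===== PRECONDITION & SPEC =====
-- Pre_ excludes only the empty list, on which both Pythons raise IndexError.
def Pre_min_max_distance (houses : List Int) (k : Int) : Prop := houses ≠ []
instance (houses : List Int) (k : Int) : Decidable (Pre_min_max_distance houses k) := by
  unfold Pre_min_max_distance; infer_instance

def pvWitness_min_max_distance : List Int × Int := ([1, 9, 4, 20], 2)

def Spec_min_max_distance (houses : List Int) (k : Int) (out : Int) : Prop := out = min_max_distance_alt houses k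
instance (houses : List Int) (k : Int) (out : Int) : Decidable (Spec_min_max_distance houses k out) := by unfold Spec_min_max_distance; infer_instance

-- ===== CLAIM (what is proved, stated in full; the proofs are below) =====
def Claim_equal_min_max_distance : Prop := ∀ (houses : List Int) (k : Int), Dom_min_max_distance houses k → Pre_min_max_distance houses k → Spec_min_max_distance houses k (min_max_distance houses k)

-- ===== LEMMAS AND PROOFS =====

-- greedy group count of a sorted list: 1 for the leading group (all elements
-- within t of the head), plus the count of the remainder
def pvGG (t : Int) : List Int → Nat
  | [] => 0
  | h :: rest => 1 + pvGG t (rest.dropWhile (fun x => decide (x ≤ h + t)))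
termination_by l => l.length
decreasing_by
  have := List.length_dropWhile_le (fun x => decide (x ≤ h + t)) rest
  simp only [List.length_cons]; omega

theorem gg_nil (t : Int) : pvGG t [] = 0 := by rw [pvGG]

theorem gg_cons (t h : Int) (rest : List Int) :
    pvGG t (h :: rest) = 1 + pvGG t (rest.dropWhile (fun x => decide (x ≤ h + t))) := by
  rw [pvGG]

theorem gg_pos (t h : Int) (rest : List Int) : 1 ≤ pvGG t (h :: rest) := by
  rw [gg_cons]; omega

-- A's greedy fold, recursively
def pvGC (t : Int) (last : Int) : List Int → Nat
  | [] => 1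
  | x :: r => if t < x - last then pvGC t x r + 1 else pvGC t last r

theorem foldA_eq (d : Int) : ∀ (xs : List Int) (c last : Int),
    (xs.foldl (fun (st : Int × Int) house =>
      if house - st.2 > 2 * d then (st.1 + 1, house) else st) (c, last)).1
    = c - 1 + (pvGC (2 * d) last xs : Int) := by
  intro xs
  induction xs with
  | nil => intro c last; simp [pvGC]
  | cons x r ih =>
    intro c last
    rw [List.foldl_cons, pvGC]
    by_cases hx : 2 * d < x - last
    · rw [if_pos (by simpa using hx), if_pos hx, ih]
      push_cast; omega
    · rw [if_neg (by simpa using hx), if_neg hx, ih]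

theorem gc_eq_gg (t : Int) : ∀ (rest : List Int) (h : Int),
    (h :: rest).Pairwise (· ≤ ·) → pvGC t h rest = pvGG t (h :: rest) := by
  intro rest
  induction rest with
  | nil => intro h _; rw [pvGC, gg_cons]; simp [gg_nil]
  | cons x xs ih =>
    intro h hp
    by_cases hx : t < x - h
    · rw [pvGC, if_pos hx, gg_cons,
        List.dropWhile_cons_of_neg (by simp; omega), ih x hp.tail]
      omega
    · have hhx : (h :: xs).Pairwise (· ≤ ·) := by
        rcases List.pairwise_cons.mp hp with ⟨h1, h2⟩
        exact List.pairwise_cons.mpr ⟨fun y hy => h1 y (by simp [hy]), h2.tail⟩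
      rw [pvGC, if_neg hx, ih h hhx, gg_cons, gg_cons,
        List.dropWhile_cons_of_pos (by simp; omega)]

-- can_cover on a sorted nonempty list decides the greedy group count
theorem canCover_iff (c : Int) (cs : List Int) (k d : Int) (hd : 0 ≤ d)
    (hp : (c :: cs).Pairwise (· ≤ ·)) :
    pvCanCover (c :: cs) k c d = decide ((pvGG (2 * d) (c :: cs) : Int) ≤ k) := by
  unfold pvCanCover
  rw [foldA_eq]
  have h0 : pvGC (2 * d) c (c :: cs) = pvGC (2 * d) c cs := by
    rw [pvGC, if_neg (by omega)]
  rw [h0, gc_eq_gg (2 * d) cs c hp]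
  norm_num

-- the index-jump helper lands exactly past the greedy group ----------------

theorem upper_char (hs : List Int) (limit : Int) : ∀ (fuel : Nat) (lo hi : Int), ∀ r : Int,
    (hi - lo).toNat ≤ fuel →
    lo ≤ r → r ≤ hi →
    (∀ m, lo ≤ m → m < r → PySem.List.pyGetD hs m 0 ≤ limit) →
    (∀ m, r ≤ m → m < hi → ¬(PySem.List.pyGetD hs m 0 ≤ limit)) →
    pvUpperLoop hs limit fuel lo hi = r := by
  intro fuel
  induction fuel with
  | zero =>
    intro lo hi r hfuel h1 h2 _ _
    rw [pvUpperLoop]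
    omega
  | succ fuel ih =>
    intro lo hi r hfuel h1 h2 hf htr
    rw [pvUpperLoop]
    by_cases h : lo < hi
    · rw [if_pos h]
      have hm : PySem.Int.floordiv (lo + hi) 2 = (lo + hi) / 2 :=
        PySem.Int.floordiv_eq_ediv_of_pos (by omega)
      by_cases hcond : PySem.List.pyGetD hs (PySem.Int.floordiv (lo + hi) 2) 0 ≤ limit
      · rw [if_pos hcond]
        have hr : PySem.Int.floordiv (lo + hi) 2 < r := by
          by_contra hcon
          exact htr (PySem.Int.floordiv (lo + hi) 2) (by omega) (by omega) hcond
        exact ih _ hi r (by omega) (by omega) h2 (fun m hm1 hm2 => hf m (by omega) hm2) htr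
      · rw [if_neg hcond]
        have hr : r ≤ PySem.Int.floordiv (lo + hi) 2 := by
          by_contra hcon
          exact hcond (hf (PySem.Int.floordiv (lo + hi) 2) (by omega) (by omega))
        exact ih lo _ r (by omega) h1 hr hf (fun m hm1 hm2 => htr m hm1 (by omega))
    · rw [if_neg h]
      omega

theorem dropWhile_eq_drop {α : Type} (p : α → Bool) : ∀ (l : List α),
    l.dropWhile p = l.drop (l.takeWhile p).length := by
  intro l
  induction l with
  | nil => simp
  | cons x xs ih =>
    by_cases hx : p x
    · rw [List.dropWhile_cons_of_pos hx, List.takeWhile_cons_of_pos hx]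
      simpa using ih
    · rw [List.dropWhile_cons_of_neg hx, List.takeWhile_cons_of_neg hx]
      simp

theorem takeWhile_stop {α : Type} (p : α → Bool) : ∀ (l : List α)
    (h : (l.takeWhile p).length < l.length),
    p (l[(l.takeWhile p).length]'h) = false := by
  intro l
  induction l with
  | nil => intro h; simp at h
  | cons x xs ih =>
    intro h
    by_cases hx : p x
    · have e : List.takeWhile p (x :: xs) = x :: List.takeWhile p xs :=
        List.takeWhile_cons_of_pos hx
      have h' : (List.takeWhile p xs).length < xs.length := by
        have := h; rw [e] at this; simpa using this
      simp only [e, List.length_cons, List.getElem_cons_succ]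
      exact ih h'
    · have e : List.takeWhile p (x :: xs) = ([] : List α) :=
        List.takeWhile_cons_of_neg hx
      simp only [e, List.length_nil, List.getElem_cons_zero]
      simpa using hx

theorem pyGetD_toNat (hs : List Int) (m : Int) (hm : 0 ≤ m) :
    PySem.List.pyGetD hs m 0 = hs.getD m.toNat 0 := by
  rw [show m = ((m.toNat : Nat) : Int) by omega, PySem.List.pyGetD_natCast]
  simp
  rw [show max m 0 = m from by omega]

theorem getD_drop (hs : List Int) (a j : Nat) (h : a + j < hs.length) :
    (hs.drop a).getD j 0 = hs.getD (a + j) 0 := by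
  rw [List.getD_eq_getElem _ _ (n := j) (by simp; omega),
    List.getD_eq_getElem _ _ (n := a + j) h, List.getElem_drop]

theorem getD_mono (hs : List Int) (hp : hs.Pairwise (· ≤ ·)) (p q : Nat) (hpq : p ≤ q)
    (hq : q < hs.length) : hs.getD p 0 ≤ hs.getD q 0 := by
  rw [List.getD_eq_getElem _ _ (n := p) (by omega), List.getD_eq_getElem _ _ (n := q) hq]
  rcases Nat.lt_or_eq_of_le hpq with h | h
  · exact List.pairwise_iff_getElem.mp hp p q (by omega) hq h
  · subst h; exact le_refl _

theorem tw_stop (p : Int → Bool) (l : List Int) (h : (l.takeWhile p).length < l.length) :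
    p (l.getD (l.takeWhile p).length 0) = false := by
  rw [List.getD_eq_getElem _ _ h]
  exact takeWhile_stop p l h

theorem tw_mem (p : Int → Bool) (l : List Int) (j : Nat) (h : j < (l.takeWhile p).length) :
    p (l.getD j 0) = true := by
  have hlen : j < l.length := lt_of_lt_of_le h ((List.takeWhile_sublist p).length_le)
  rw [List.getD_eq_getElem _ _ hlen]
  obtain ⟨suf, hsuf⟩ := List.takeWhile_prefix p (l := l)
  have e : l[j]'hlen = (List.takeWhile p l ++ suf)[j]'(by rw [hsuf]; exact hlen) :=
    List.getElem_of_eq hsuf.symm hlen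
  rw [e, List.getElem_append_left h]
  exact List.mem_takeWhile_imp (List.getElem_mem _)

theorem upper_eq (hs : List Int) (hp : hs.Pairwise (· ≤ ·)) (i : Int) (limit : Int)
    (h0 : 0 ≤ i) (hlt : i < (hs.length : Int)) :
    pvUpperLoop hs limit ((hs.length : Int) - (i + 1)).toNat (i + 1) (hs.length : Int)
      = i + 1 + (((hs.drop (i.toNat + 1)).takeWhile (fun x => decide (x ≤ limit))).length : Int) ∧
    hs.drop (i.toNat + 1 + ((hs.drop (i.toNat + 1)).takeWhile (fun x => decide (x ≤ limit))).length)
      = (hs.drop (i.toNat + 1)).dropWhile (fun x => decide (x ≤ limit)) := by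
  set L := hs.drop (i.toNat + 1) with hL
  set w := (L.takeWhile (fun x => decide (x ≤ limit))).length with hw
  have hLlen : L.length = hs.length - (i.toNat + 1) := by rw [hL]; simp
  have hwlen : w ≤ L.length := by
    rw [hw]; exact (List.takeWhile_sublist _).length_le
  have hpL : L.Pairwise (· ≤ ·) := hp.sublist (List.drop_sublist _ _)
  constructor
  · apply upper_char
    · omega
    · omega
    · omega
    · intro m hm1 hm2
      rw [pyGetD_toNat hs m (by omega)]
      have hj : hs.getD m.toNat 0 = L.getD (m.toNat - (i.toNat + 1)) 0 := by
        rw [hL, getD_drop hs (i.toNat + 1) (m.toNat - (i.toNat + 1)) (by omega)]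
        congr 1
        omega
      rw [hj]
      have := tw_mem (fun x => decide (x ≤ limit)) L (m.toNat - (i.toNat + 1)) (by omega)
      simpa using this
    · intro m hm1 hm2
      rw [pyGetD_toNat hs m (by omega)]
      have hj : hs.getD m.toNat 0 = L.getD (m.toNat - (i.toNat + 1)) 0 := by
        rw [hL, getD_drop hs (i.toNat + 1) (m.toNat - (i.toNat + 1)) (by omega)]
        congr 1
        omega
      rw [hj]
      have hwL : w < L.length := by omega
      have hstop := tw_stop (fun x => decide (x ≤ limit)) L hwL
      rw [← hw] at hstop
      simp only [decide_eq_false_iff_not] at hstop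
      have hmo := getD_mono L hpL w (m.toNat - (i.toNat + 1)) (by omega) (by omega)
      omega
  · rw [dropWhile_eq_drop, ← hw, hL, List.drop_drop]

-- the capped jump loop decides 'greedy count of the remaining suffix fits in k'
theorem groups_le_iff (hs : List Int) (hp : hs.Pairwise (· ≤ ·)) (k t : Int) :
    ∀ (fuel : Nat) (i g : Int), 0 ≤ i → i ≤ (hs.length : Int) →
    ((hs.length : Int) - i).toNat ≤ fuel → 0 ≤ g →
    (pvGroups hs (hs.length : Int) k t fuel i g ≤ k ↔
      g + (pvGG t (hs.drop i.toNat) : Int) ≤ k) := by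
  intro fuel
  induction fuel with
  | zero =>
    intro i g h1 h2 h3 h4
    rw [pvGroups]
    rw [List.drop_eq_nil_of_le (by omega), gg_nil]
    omega
  | succ fuel ih =>
    intro i g h1 h2 h3 h4
    by_cases hin : i < (hs.length : Int)
    · rw [pvGroups]
      rw [if_pos hin]
      have hitn : i.toNat < hs.length := by omega
      have hdropc : hs.drop i.toNat = hs.getD i.toNat 0 :: hs.drop (i.toNat + 1) := by
        rw [List.drop_eq_getElem_cons hitn, List.getD_eq_getElem _ _ hitn]
      by_cases hkg : k < g + 1
      · rw [if_pos hkg, hdropc]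
        have := gg_pos t (hs.getD i.toNat 0) (hs.drop (i.toNat + 1))
        constructor
        · intro hcon; omega
        · intro hcon; omega
      · rw [if_neg hkg]
        rw [pyGetD_toNat hs i h1]
        obtain ⟨hup, hdrop⟩ := upper_eq hs hp i (hs.getD i.toNat 0 + t) h1 (by omega)
        set w := ((hs.drop (i.toNat + 1)).takeWhile
          (fun x => decide (x ≤ hs.getD i.toNat 0 + t))).length with hwdef
        have hwlen : w ≤ hs.length - (i.toNat + 1) := by
          rw [hwdef]
          have := (List.takeWhile_sublist
            (l := hs.drop (i.toNat + 1))
            (fun x => decide (x ≤ hs.getD i.toNat 0 + t))).length_le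
          simpa using this
        rw [hup]
        rw [ih (i + 1 + (w : Int)) (g + 1) (by omega) (by omega) (by omega) (by omega)]
        have htn : (i + 1 + (w : Int)).toNat = i.toNat + 1 + w := by omega
        rw [htn, hdrop, hdropc, gg_cons]
        push_cast
        omega
    · rw [pvGroups]
      rw [if_neg hin]
      rw [List.drop_eq_nil_of_le (by omega), gg_nil]
      omega

theorem groups_iff (hs : List Int) (hp : hs.Pairwise (· ≤ ·)) (k t : Int) :
    pvGroups hs (hs.length : Int) k t hs.length 0 0 ≤ k ↔ (pvGG t hs : Int) ≤ k := by
  have := groups_le_iff hs hp k t hs.length 0 0 (by omega) (by omega) (by omega) (by omega)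
  simpa using this

-- the two binary searches take the same branches: pointwise-equal predicates
theorem searches_eq (hs : List Int) (k h0 n : Int)
    (hpred : ∀ d : Int, 0 ≤ d →
      pvCanCover hs k h0 d = decide (pvGroups hs n k (2 * d) hs.length 0 0 ≤ k)) :
    ∀ (fuel : Nat) (lo hi : Int), 0 ≤ lo →
      pvSearchA hs k h0 fuel lo hi = pvSearchB hs n k fuel lo hi := by
  intro fuel
  induction fuel with
  | zero => intro lo hi _; rw [pvSearchA, pvSearchB]
  | succ fuel ih =>
    intro lo hi hlo
    rw [pvSearchA, pvSearchB]
    by_cases h : lo < hi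
    · rw [if_pos h, if_pos h]
      have hm : PySem.Int.floordiv (lo + hi) 2 = (lo + hi) / 2 :=
        PySem.Int.floordiv_eq_ediv_of_pos (by omega)
      have hmid : 0 ≤ PySem.Int.floordiv (lo + hi) 2 := by omega
      rw [hpred _ hmid]
      by_cases hB : pvGroups hs n k (2 * PySem.Int.floordiv (lo + hi) 2) hs.length 0 0 ≤ k
      · rw [if_pos (decide_eq_true hB), if_pos hB]
        exact ih lo _ hlo
      · rw [if_neg (fun hEq => hB (of_decide_eq_true hEq)), if_neg hB]
        exact ih _ hi (by omega)
    · rw [if_neg h, if_neg h]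

-- ===== the main equivalence =====

theorem main_equiv (houses : List Int) (k : Int) (hne : houses ≠ []) :
    min_max_distance houses k = min_max_distance_alt houses k := by
  simp only [min_max_distance, min_max_distance_alt]
  set hs := PySem.List.sorted houses (fun x => x) false with hhs
  have hsne : hs ≠ [] := by
    rw [hhs, Ne, PySem.List.sorted_eq_nil_iff]
    exact hne
  have hp : hs.Pairwise (· ≤ ·) := by
    have := PySem.List.sorted_pairwise (xs := houses) (key := fun x => x)
    simpa [← hhs] using this
  obtain ⟨c, cs, hcc⟩ := List.exists_cons_of_ne_nil hsne
  have hlen : 1 ≤ hs.length := by rw [hcc]; simp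
  have hgetl : PySem.List.pyGetD hs (-1) 0 = hs.getD (hs.length - 1) 0 := by
    rw [PySem.List.pyGetD_neg_one hs 0 hsne, List.getLast_eq_getElem,
      List.getD_eq_getElem _ _ (n := hs.length - 1) (by omega)]
  have hgetn1 : PySem.List.pyGetD hs ((hs.length : Int) - 1) 0 = hs.getD (hs.length - 1) 0 := by
    rw [pyGetD_toNat hs ((hs.length : Int) - 1) (by omega)]
    congr 1
    omega
  rw [hgetl, hgetn1]
  have hc0 : PySem.List.pyGetD hs 0 0 = c := by
    rw [pyGetD_toNat hs 0 (by omega), hcc]; rfl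
  refine searches_eq _ _ _ _ ?_ _ _ _ (by omega)
  intro d hd
  rw [hc0, hcc, canCover_iff c cs k d hd (by rw [← hcc]; exact hp), ← hcc]
  have := groups_iff hs hp k (2 * d)
  by_cases hgg : (pvGG (2 * d) hs : Int) ≤ k
  · rw [decide_eq_true hgg, decide_eq_true (this.mpr hgg)]
  · rw [decide_eq_false hgg, decide_eq_false (fun hcon => hgg (this.mp hcon))]

theorem min_max_distance_spec : Claim_equal_min_max_distance := by
  intro houses k _ hpre
  unfold Spec_min_max_distance
  exact main_equiv houses k hpre
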